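-- pv_equiv track=rewrite | github.com/jykstudy/DA_Study | 프로그래머스/0/181860. 빈 배열에 추가， 삭제하기/빈 배열에 추가， 삭제하기.py | solution
-- ===== SOURCE A (Python) =====
-- def solution(arr, flag):
--     X = []
--     for i in range(len(arr)):
--         if flag[i]:
--             X.extend([arr[i]]*(arr[i]*2))
--         else:
--             if arr[i] <= len(X):
--                     X = X[:-arr[i]]
--             else:
--                     X = []
--     return X
-- ===== SOURCE B (Python) =====
-- def solution(arr, flag):
--     # Run-length stack: keep (value, count) runs and the current length;
--     # expand to a concrete list only once at the end.
--     runs = []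
--     total = 0
--     for x, f in zip(arr, flag):
--         if f:
--             runs.append((x, 2 * x))
--             total += 2 * x
--         else:
--             keep = max(total - x, 0)
--             while total > keep:
--                 v, c = runs.pop()
--                 if total - c >= keep:
--                     total -= c
--                 else:
--                     runs.append((v, keep - (total - c)))
--                     total = keep
--     out = []
--     for v, c in runs:
--         out += [v] * c
--     return out
-- ===== Notes on version B (the rewrite author's own statement) =====
-- stated objective: alternative
-- what changed: B keeps a run-length (value,count) stack with the current length instead of materialising X at every step, expanding to a real list only once at the end; Pre_ restricts to the problem's natural domain (flag at least as long as arr, every count arr[i] >= 1): outside it A either raises IndexError or its slice X[:-arr[i]] on non-positive counts yields corner values no specification would fix.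
-- outside the precondition, e.g. on solution([3, 0], [True, False]): A returns [], B returns [3, 3, 3, 3, 3, 3]; on solution([2, -1], [True, False]): A returns [2], B returns [2, 2, 2, 2]
import Mathlib
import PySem

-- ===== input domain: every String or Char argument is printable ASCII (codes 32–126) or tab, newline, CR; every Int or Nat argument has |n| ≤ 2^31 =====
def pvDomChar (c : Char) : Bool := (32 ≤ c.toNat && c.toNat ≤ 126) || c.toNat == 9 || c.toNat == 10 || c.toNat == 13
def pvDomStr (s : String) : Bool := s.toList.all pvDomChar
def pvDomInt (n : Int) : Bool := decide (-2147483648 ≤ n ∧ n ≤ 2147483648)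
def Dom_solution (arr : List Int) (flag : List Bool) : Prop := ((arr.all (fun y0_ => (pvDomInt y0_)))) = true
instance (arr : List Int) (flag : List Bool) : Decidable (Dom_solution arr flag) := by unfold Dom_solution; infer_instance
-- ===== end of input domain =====

-- B replaces A's per-step list materialisation by a run-length (value,count) stack
-- expanded once at the end; equivalence of the return values is proved on Pre_.

-- ===== PORT A =====
-- loop body of A, on the pair (arr[i], flag[i])
def stepA (X : List Int) (p : Int × Bool) : List Int :=
  if p.2 then
    X ++ List.replicate (p.1 * 2).toNat p.1        -- X.extend([arr[i]]*(arr[i]*2))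
  else
    if p.1 ≤ (X.length : Int) then
      PySem.List.slice X none (some (-p.1))        -- X = X[:-arr[i]]
    else
      []

def solution (arr : List Int) (flag : List Bool) : List Int :=
  (PySem.List.pyRange 0 (arr.length : Int) 1).foldl
    (fun X i => stepA X (PySem.List.pyGetD arr i 0, PySem.List.pyGetD flag i false)) []

-- ===== PORT B =====
-- B's run-length stack; Lean keeps the stack with its TOP at the HEAD (Python's
-- append/pop at the right end become cons/head here).
-- the inner 'while total > keep: pop …' loop of Source B
def truncRuns (keep : Int) : List (Int × Int) → Int → (List (Int × Int)) × Int
  | [], total => ([], total)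
  | (v, c) :: rest, total =>
    if keep < total then
      if keep ≤ total - c then truncRuns keep rest (total - c)
      else ((v, keep - (total - c)) :: rest, keep)
    else ((v, c) :: rest, total)

def stepB (st : (List (Int × Int)) × Int) (p : Int × Bool) : (List (Int × Int)) × Int :=
  if p.2 then
    ((p.1, 2 * p.1) :: st.1, st.2 + 2 * p.1)
  else
    truncRuns (max (st.2 - p.1) 0) st.1 st.2

def solution_alt (arr : List Int) (flag : List Bool) : List Int :=
  let st := (arr.zip flag).foldl stepB ([], 0)
  st.1.reverse.foldl (fun out p => out ++ List.replicate p.2.toNat p.1) []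

-- ===== PRECONDITION & SPEC =====
-- Pre_ is the problem's natural domain: flag at least as long as arr (A raises
-- IndexError otherwise) and every arr[i] at least 1 (arr[i] is a copy/removal
-- count; on non-positive counts A's slice X[:-arr[i]] yields corner values no
-- specification would fix).
def Pre_solution (arr : List Int) (flag : List Bool) : Prop :=
  arr.length ≤ flag.length ∧ ∀ x ∈ arr, 1 ≤ x
instance (arr : List Int) (flag : List Bool) : Decidable (Pre_solution arr flag) := by unfold Pre_solution; infer_instance
def pvWitness_solution : List Int × List Bool := ([2, 1, 3], [true, false, true])

def Spec_solution (arr : List Int) (flag : List Bool) (out : List Int) : Prop := out = solution_alt arr flag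
instance (arr : List Int) (flag : List Bool) (out : List Int) : Decidable (Spec_solution arr flag out) := by unfold Spec_solution; infer_instance

-- ===== CLAIM (what is proved, stated in full; the proofs are below) =====
def Claim_equal_solution : Prop := ∀ (arr : List Int) (flag : List Bool), Dom_solution arr flag → Pre_solution arr flag → Spec_solution arr flag (solution arr flag)

-- ===== LEMMAS AND PROOFS =====
def expandRuns (runs : List (Int × Int)) : List Int :=
  runs.reverse.flatMap (fun p => List.replicate p.2.toNat p.1)

theorem expandRuns_nil : expandRuns [] = [] := rfl

theorem expandRuns_cons (v c : Int) (rs : List (Int × Int)) :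
    expandRuns ((v, c) :: rs) = expandRuns rs ++ List.replicate c.toNat v := by
  simp [expandRuns]

theorem truncRuns_spec (keep : Int) (runs : List (Int × Int)) (total : Int)
    (hpos : ∀ p ∈ runs, 0 < p.2) (hlen : total = ((expandRuns runs).length : Int))
    (h0 : 0 ≤ keep) (h1 : keep ≤ total) :
    (∀ p ∈ (truncRuns keep runs total).1, 0 < p.2) ∧
    (truncRuns keep runs total).2 = keep ∧
    expandRuns (truncRuns keep runs total).1 = (expandRuns runs).take keep.toNat := by
  induction runs generalizing total with
  | nil =>
    simp [expandRuns_nil] at hlen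
    subst hlen
    have hs0 : keep = 0 := le_antisymm h1 h0
    simp [truncRuns, hs0, expandRuns_nil]
  | cons p rest ih =>
    obtain ⟨v, c⟩ := p
    have hc : 0 < c := hpos (v, c) (by simp)
    have hrest : ∀ q ∈ rest, 0 < q.2 := fun q hq => hpos q (by simp [hq])
    rw [expandRuns_cons] at hlen
    simp only [List.length_append, List.length_replicate] at hlen
    by_cases hlt : keep < total
    · by_cases hle : keep ≤ total - c
      · have ih' := ih (total - c) hrest (by omega) hle
        simp only [truncRuns, if_pos hlt, if_pos hle]
        refine ⟨ih'.1, ih'.2.1, ?_⟩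
        rw [ih'.2.2, expandRuns_cons,
          List.take_append_of_le_length (by omega)]
      · simp only [truncRuns, if_pos hlt, if_neg hle]
        refine ⟨?_, by trivial, ?_⟩
        · intro q hq
          rcases List.mem_cons.mp hq with h | h
          · subst h; simp; omega
          · exact hrest q h
        · rw [expandRuns_cons, expandRuns_cons, List.take_append,
            List.take_of_length_le (by omega), List.take_replicate]
          congr 2
          omega
    · have hst : keep = total := by omega
      subst hst
      simp only [truncRuns, if_neg hlt]
      refine ⟨hpos, by trivial, ?_⟩
      rw [List.take_of_length_le (by rw [expandRuns_cons]; simp; omega)]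

theorem slice_neg_eq_take (X : List Int) (x : Int) (h1 : 1 ≤ x) (h2 : x ≤ (X.length : Int)) :
    PySem.List.slice X none (some (-x)) = X.take ((X.length : Int) - x).toNat := by
  have hxe : -x = -((x.toNat : Nat) : Int) := by omega
  rw [hxe, PySem.List.slice_to_neg_natCast X x.toNat (by omega)]
  congr 1
  omega

theorem stepB_one (runs : List (Int × Int)) (total : Int) (p : Int × Bool)
    (hx : 1 ≤ p.1)
    (hpos : ∀ q ∈ runs, 0 < q.2) (hlen : total = ((expandRuns runs).length : Int)) :
    (∀ q ∈ (stepB (runs, total) p).1, 0 < q.2) ∧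
    (stepB (runs, total) p).2 = ((expandRuns (stepB (runs, total) p).1).length : Int) ∧
    stepA (expandRuns runs) p = expandRuns (stepB (runs, total) p).1 := by
  obtain ⟨x, f⟩ := p
  simp only at hx
  cases f with
  | true =>
    have he : stepB (runs, total) (x, true) = ((x, 2 * x) :: runs, total + 2 * x) := by
      simp [stepB]
    rw [he]
    refine ⟨?_, ?_, ?_⟩
    · intro q hq
      rcases List.mem_cons.mp hq with h | h
      · subst h; simp; omega
      · exact hpos q h
    · rw [expandRuns_cons]
      simp only [List.length_append, List.length_replicate]
      omega
    · rw [expandRuns_cons]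
      have : (x * 2).toNat = (2 * x).toNat := by ring_nf
      simp [stepA, this]
  | false =>
    have htot : 0 ≤ total := by rw [hlen]; positivity
    set keep := max (total - x) 0 with hkeep
    have he : stepB (runs, total) (x, false) = truncRuns keep runs total := by
      simp [stepB, hkeep]
    rw [he]
    have h0 : 0 ≤ keep := by omega
    have h1 : keep ≤ total := by omega
    have hts := truncRuns_spec keep runs total hpos hlen h0 h1
    refine ⟨hts.1, ?_, ?_⟩
    · rw [hts.2.1, hts.2.2]
      simp only [List.length_take]
      omega
    · rw [hts.2.2]
      by_cases hle : x ≤ total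
      · have hA : stepA (expandRuns runs) (x, false) =
            PySem.List.slice (expandRuns runs) none (some (-x)) := by
          simp only [stepA]
          rw [if_neg (by simp), if_pos (by omega)]
        rw [hA, slice_neg_eq_take _ _ hx (by omega), ← hlen]
        congr 1
        omega
      · have hA : stepA (expandRuns runs) (x, false) = [] := by
          simp only [stepA, ← hlen]
          rw [if_neg (by simp), if_neg (by omega)]
        rw [hA]
        have : keep.toNat = 0 := by omega
        simp [this]

theorem loop_inv (ps : List (Int × Bool)) :
    ∀ (runs : List (Int × Int)) (total : Int),
    (∀ q ∈ ps, 1 ≤ q.1) →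
    (∀ q ∈ runs, 0 < q.2) → total = ((expandRuns runs).length : Int) →
    (∀ q ∈ (ps.foldl stepB (runs, total)).1, 0 < q.2) ∧
    (ps.foldl stepB (runs, total)).2 = ((expandRuns (ps.foldl stepB (runs, total)).1).length : Int) ∧
    ps.foldl stepA (expandRuns runs) = expandRuns (ps.foldl stepB (runs, total)).1 := by
  induction ps with
  | nil => intro runs total _ h1 h2; exact ⟨h1, h2, rfl⟩
  | cons p rest ih =>
    intro runs total hxs h1 h2
    have hs := stepB_one runs total p (hxs p (by simp)) h1 h2
    have ihs := ih (stepB (runs, total) p).1 (stepB (runs, total) p).2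
      (fun q hq => hxs q (by simp [hq])) hs.1 hs.2.1
    simp only [List.foldl_cons]
    refine ⟨ihs.1, ihs.2.1, ?_⟩
    rw [hs.2.2, ihs.2.2]

theorem bridge (arr : List Int) (flag : List Bool) (h : arr.length ≤ flag.length) :
    ∀ (k : Nat) (X : List Int), k ≤ arr.length →
    (PySem.List.pyRange (k : Int) (arr.length : Int) 1).foldl
      (fun X i => stepA X (PySem.List.pyGetD arr i 0, PySem.List.pyGetD flag i false)) X
    = ((arr.drop k).zip (flag.drop k)).foldl stepA X := by
  intro k X hk
  induction hn : arr.length - k generalizing k X with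
  | zero =>
    have hke : k = arr.length := by omega
    subst hke
    rw [PySem.List.pyRange_one_eq_nil (by omega)]
    rw [List.drop_of_length_le (le_refl _)]
    simp
  | succ n ihn =>
    have hklt : k < arr.length := by omega
    have hkf : k < flag.length := by omega
    rw [PySem.List.pyRange_one_cons (by exact_mod_cast hklt)]
    rw [List.foldl_cons]
    have ha : PySem.List.pyGetD arr (k : Int) 0 = arr[k] := by
      rw [PySem.List.pyGetD_natCast]; exact List.getD_eq_getElem arr 0 hklt
    have hf : PySem.List.pyGetD flag (k : Int) false = flag[k] := by
      rw [PySem.List.pyGetD_natCast]; exact List.getD_eq_getElem flag false hkf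
    rw [ha, hf]
    have hd1 : arr.drop k = arr[k] :: arr.drop (k + 1) := List.drop_eq_getElem_cons hklt
    have hd2 : flag.drop k = flag[k] :: flag.drop (k + 1) := List.drop_eq_getElem_cons hkf
    rw [hd1, hd2, List.zip_cons_cons, List.foldl_cons]
    have : ((k : Int) + 1) = ((k + 1 : Nat) : Int) := by push_cast; ring
    rw [this]
    exact ihn (k + 1) _ (by omega) (by omega)

-- ===== VERDICT (by name: the statement is the Claim_ definition above) =====
theorem solution_spec : Claim_equal_solution := by
  intro arr flag _hdom hpre
  unfold Spec_solution solution solution_alt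
  have hb := bridge arr flag hpre.1 0 [] (by omega)
  simp only [Nat.cast_zero, List.drop_zero] at hb
  rw [hb]
  have hxs : ∀ q ∈ arr.zip flag, 1 ≤ q.1 := by
    intro q hq
    exact hpre.2 q.1 (List.of_mem_zip hq).1
  have hl := loop_inv (arr.zip flag) [] 0 hxs (by simp) (by simp [expandRuns_nil])
  rw [show expandRuns [] = [] from rfl] at hl
  rw [hl.2.2]
  rw [PySem.List.foldl_append_eq_flatMap]
  simp [expandRuns]
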